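-- pv_equiv track=rewrite | github.com/hellodommy/cs3245-hw | HW2/utility.py | add_skip_ptr
-- ===== SOURCE A (Python) =====
-- import math
--
-- def add_skip_ptr(posting_list):
--     '''
--     Returns a string form of posting list with skip pointers, indicated by carat
--     '''
--     l = len(posting_list)
--     result = ''
--     if l > 2:
--         num_ptr = math.floor(math.sqrt(l))
--         ptr_gap = math.floor(l / num_ptr)
--         for i in range(l):
--             if i % ptr_gap == 0 and i < l - 2:
--                 if i + ptr_gap >= l:
--                     result += str(posting_list[i]) + \
--                         ' ^' + str(l - i - 1) + ' '
--                 else: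
--                     result += str(posting_list[i]) + ' ^' + str(ptr_gap) + ' '
--             else:
--                 result += str(posting_list[i]) + ' '
--     else:
--         for i in range(l):
--             result += str(posting_list[i]) + ' '
--     return result
-- ===== SOURCE B (Python) =====
-- import math
--
-- def add_skip_ptr(posting_list):
--     '''
--     Returns a string form of posting list with skip pointers, indicated by carat
--     '''
--     l = len(posting_list)
--     if l <= 2:
--         return ''.join(str(x) + ' ' for x in posting_list)
--     gap = l // math.isqrt(l)
--
--     def emit(rest, pos):
--         # each recursive call renders one block: an annotated head, then its plain tail
--         if not rest:
--             return ''
--         head = str(rest[0])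
--         if pos < l - 2:
--             head += ' ^' + str(gap if pos + gap < l else l - pos - 1)
--         tail = ''.join(str(x) + ' ' for x in rest[1:gap])
--         return head + ' ' + tail + emit(rest[gap:], pos + gap)
--
--     return emit(posting_list, 0)
-- ===== Notes on version B (the rewrite author's own statement) =====
-- stated objective: alternative
-- what changed: B is a recursive chunk renderer: it slices the posting list into blocks of length ptr_gap and each recursive call emits one block (annotated head via the block's start offset, then the plain tail of the block, then the recursion on the remaining suffix), instead of A's single indexed loop that tests i % ptr_gap == 0 at every index while concatenating onto one result string.
import Mathlib
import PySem

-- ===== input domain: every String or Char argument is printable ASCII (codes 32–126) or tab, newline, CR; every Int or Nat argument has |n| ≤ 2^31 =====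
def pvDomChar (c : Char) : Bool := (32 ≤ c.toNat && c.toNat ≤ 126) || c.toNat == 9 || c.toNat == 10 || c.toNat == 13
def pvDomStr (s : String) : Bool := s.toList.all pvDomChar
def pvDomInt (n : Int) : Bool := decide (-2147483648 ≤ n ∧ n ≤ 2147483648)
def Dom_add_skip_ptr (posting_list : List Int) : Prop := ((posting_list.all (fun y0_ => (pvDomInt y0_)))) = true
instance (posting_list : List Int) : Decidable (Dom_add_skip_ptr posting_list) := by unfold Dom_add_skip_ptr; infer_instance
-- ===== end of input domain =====

-- B renders the list as recursively emitted blocks of length ptr_gap (annotated head + plain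
-- block tail + recursion on the remaining suffix) instead of A's per-index modulo-tested loop
-- (objective: alternative decomposition; not faster).


-- ===== PORT A =====
-- math.floor(math.sqrt(l)) on a list length is exactly Nat.sqrt; math.floor(l / num_ptr)
-- on these magnitudes is exactly floor division.
def add_skip_ptr (posting_list : List Int) : String :=
  let l : Int := posting_list.length
  let result : String := ""
  if l > 2 then
    let num_ptr : Int := (Nat.sqrt posting_list.length : Int)
    let ptr_gap : Int := PySem.Int.floordiv l num_ptr
    (PySem.List.pyRange 0 l 1).foldl (fun result i =>
      if PySem.Int.mod i ptr_gap = 0 ∧ i < l - 2 then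
        if i + ptr_gap ≥ l then
          result ++ PySem.Int.toStr (PySem.List.pyGetD posting_list i 0) ++ " ^" ++
            PySem.Int.toStr (l - i - 1) ++ " "
        else
          result ++ PySem.Int.toStr (PySem.List.pyGetD posting_list i 0) ++ " ^" ++
            PySem.Int.toStr ptr_gap ++ " "
      else
        result ++ PySem.Int.toStr (PySem.List.pyGetD posting_list i 0) ++ " ") result
  else
    (PySem.List.pyRange 0 l 1).foldl (fun result i =>
      result ++ PySem.Int.toStr (PySem.List.pyGetD posting_list i 0) ++ " ") result

-- ===== PORT B =====
-- emit(rest, pos): renders one block per call.  rest[1:gap] and rest[gap:] are written as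
-- take/drop on the tail, exact for the gap ≥ 1 with which emit is always called (l // isqrt(l)
-- with l ≥ 3); math.isqrt is exactly Nat.sqrt.
def addSkipEmit (l gap : Int) : List Int → Int → String
  | [], _ => ""
  | x :: rest', pos =>
      let head := PySem.Int.toStr x ++
        (if pos < l - 2 then
          " ^" ++ PySem.Int.toStr (if pos + gap < l then gap else l - pos - 1)
         else "")
      let tail := PySem.Str.join "" ((rest'.take (gap - 1).toNat).map (fun y => PySem.Int.toStr y ++ " "))
      head ++ " " ++ tail ++ addSkipEmit l gap (rest'.drop (gap - 1).toNat) (pos + gap)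
  termination_by rest _ => rest.length
  decreasing_by simp

def add_skip_ptr_alt (posting_list : List Int) : String :=
  let l : Int := posting_list.length
  if l ≤ 2 then
    PySem.Str.join "" (posting_list.map (fun x => PySem.Int.toStr x ++ " "))
  else
    let gap : Int := PySem.Int.floordiv l ((Nat.sqrt posting_list.length : Nat) : Int)
    addSkipEmit l gap posting_list 0

-- ===== PRECONDITION & SPEC =====
def Spec_add_skip_ptr (posting_list : List Int) (out : String) : Prop := out = add_skip_ptr_alt posting_list
instance (posting_list : List Int) (out : String) : Decidable (Spec_add_skip_ptr posting_list out) := by unfold Spec_add_skip_ptr; infer_instance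

-- ===== CLAIM (what is proved, stated in full; the proofs are below) =====
def Claim_equal_add_skip_ptr : Prop := ∀ (posting_list : List Int), Dom_add_skip_ptr posting_list → Spec_add_skip_ptr posting_list (add_skip_ptr posting_list)

-- ===== LEMMAS AND PROOFS =====

-- the per-index token A's loop appends at index i (annotation included)
def pvTok (pl : List Int) (gap : Int) (i : Int) : String :=
  if PySem.Int.mod i gap = 0 ∧ i < (pl.length : Int) - 2 then
    if i + gap ≥ (pl.length : Int) then
      PySem.Int.toStr (PySem.List.pyGetD pl i 0) ++ " ^" ++
        PySem.Int.toStr ((pl.length : Int) - i - 1) ++ " "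
    else
      PySem.Int.toStr (PySem.List.pyGetD pl i 0) ++ " ^" ++ PySem.Int.toStr gap ++ " "
  else PySem.Int.toStr (PySem.List.pyGetD pl i 0) ++ " "

-- ''.join with empty separator, one element at a time
lemma joinEmpty_nil : PySem.Str.join "" ([] : List String) = "" := by
  apply String.toList_inj.mp
  simp [PySem.Str.join, PySem.Chars.join, List.intercalate]

lemma joinEmpty_cons (p : String) (ps : List String) :
    PySem.Str.join "" (p :: ps) = p ++ PySem.Str.join "" ps := by
  apply String.toList_inj.mp
  simp [PySem.Str.join, PySem.Chars.join]
  cases ps <;> simp [List.intercalate]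

lemma joinEmpty_append (a b : List String) :
    PySem.Str.join "" (a ++ b) = PySem.Str.join "" a ++ PySem.Str.join "" b := by
  induction a with
  | nil => simp [joinEmpty_nil]
  | cons p t ih => simp [joinEmpty_cons, ih, String.append_assoc]

-- a left fold appending one string per element IS ''.join of the mapped list
lemma foldl_append_eq_join (f : Int → String) :
    ∀ (xs : List Int) (acc : String),
      xs.foldl (fun r i => r ++ f i) acc = acc ++ PySem.Str.join "" (xs.map f) := by
  intro xs
  induction xs with
  | nil => intro acc; simp [joinEmpty_nil]
  | cons x t ih =>
      intro acc
      simp only [List.foldl_cons, List.map_cons, joinEmpty_cons, ih, String.append_assoc]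

-- indexing a sub-range of the list through pyGetD is the corresponding drop/take
lemma map_pyGetD_range_drop_take (xs : List Int) (a b : Int)
    (h0 : 0 ≤ a) (_hab : a ≤ b) (hb : b ≤ (xs.length : Int)) :
    (PySem.List.pyRange a b 1).map (fun j => PySem.List.pyGetD xs j 0) =
    (xs.drop a.toNat).take (b - a).toNat := by
  apply List.ext_getElem
  · simp [PySem.List.length_pyRange_one]; omega
  · intro k hk1 hk2
    have hklt : k < (b - a).toNat := by
      simpa [PySem.List.length_pyRange_one] using hk1
    simp only [List.getElem_map, PySem.List.getElem_pyRange_one]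
    rw [List.getElem_take, List.getElem_drop]
    rw [PySem.List.pyGetD_eq_getElem xs 0 (by omega) (by omega)]
    congr 1
    omega

-- B's recursive block emitter produces exactly A's per-index tokens over the remaining range
lemma emit_eq_join (pl : List Int) (gap : Int) (hgap : 1 ≤ gap) :
    ∀ (n : Nat) (rest : List Int) (pos : Int), rest.length ≤ n → 0 ≤ pos → gap ∣ pos →
      rest = pl.drop pos.toNat →
      addSkipEmit (pl.length : Int) gap rest pos =
        PySem.Str.join "" ((PySem.List.pyRange pos (pl.length : Int) 1).map (pvTok pl gap)) := by
  intro n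
  induction n with
  | zero =>
      intro rest pos hlen h0 _ hdrop
      have hnil : rest = [] := List.eq_nil_of_length_eq_zero (by omega)
      subst hnil
      have : (pl.length : Int) ≤ pos := by
        have := congrArg List.length hdrop
        simp [List.length_drop] at this
        omega
      rw [PySem.List.pyRange_one_eq_nil this, List.map_nil, joinEmpty_nil, addSkipEmit]
  | succ m ih =>
      intro rest pos hlen h0 hdvd hdrop
      match rest, hdrop with
      | [], hdrop =>
          have : (pl.length : Int) ≤ pos := by
            have := congrArg List.length hdrop
            simp [List.length_drop] at this
            omega
          rw [PySem.List.pyRange_one_eq_nil this, List.map_nil, joinEmpty_nil, addSkipEmit]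
      | x :: rest', hdrop =>
          have hlenr : rest'.length + 1 = pl.length - pos.toNat := by
            have := congrArg List.length hdrop
            simpa [List.length_drop] using this
          have hposl : pos < (pl.length : Int) := by omega
          have hx : PySem.List.pyGetD pl pos 0 = x := by
            rw [PySem.List.pyGetD_eq_getElem pl 0 h0 (by omega)]
            have h9 : pl[pos.toNat + 0]? = some x := by
              rw [← List.getElem?_drop, ← hdrop]; rfl
            have h10 := (List.getElem?_eq_some_iff.mp h9).2
            simpa using h10
          have hrest' : rest' = pl.drop (pos.toNat + 1) := by
            have : (pl.drop pos.toNat).drop 1 = pl.drop (pos.toNat + 1) := by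
              rw [List.drop_drop]
            rw [← hdrop] at this
            simpa using this
          set l : Int := (pl.length : Int) with hl
          set m2 : Int := min (pos + gap) l with hm2
          have hpm : pos ≤ m2 := by omega
          have hml : m2 ≤ l := by omega
          have hpltm : pos < m2 := by omega
          rw [PySem.List.pyRange_one_append pos m2 l hpm hml]
          rw [List.map_append, joinEmpty_append]
          rw [PySem.List.pyRange_one_cons hpltm, List.map_cons, joinEmpty_cons]
          -- head token
          have hmod : PySem.Int.mod pos gap = 0 := (PySem.Int.mod_eq_zero_iff_dvd pos gap).mpr hdvd
          have hhead : pvTok pl gap pos =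
              (PySem.Int.toStr x ++
                (if pos < l - 2 then
                  " ^" ++ PySem.Int.toStr (if pos + gap < l then gap else l - pos - 1)
                 else "")) ++ " " := by
            unfold pvTok
            rw [← hl, hx]
            by_cases hc : pos < l - 2
            · rw [if_pos ⟨hmod, hc⟩]
              by_cases hend : pos + gap ≥ l
              · rw [if_pos hend, if_pos hc, if_neg (by omega)]
                simp [String.append_assoc]
              · rw [if_neg hend, if_pos hc, if_pos (by omega)]
                simp [String.append_assoc]
            · rw [if_neg (by tauto), if_neg hc]
              simp
          -- tail tokens: plain, no annotation (no multiple of gap strictly inside the block)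
          have htail : (PySem.List.pyRange (pos + 1) m2 1).map (pvTok pl gap) =
              (rest'.take (gap - 1).toNat).map (fun y => PySem.Int.toStr y ++ " ") := by
            have h1 : (PySem.List.pyRange (pos + 1) m2 1).map (pvTok pl gap) =
                (PySem.List.pyRange (pos + 1) m2 1).map
                  (fun j => PySem.Int.toStr (PySem.List.pyGetD pl j 0) ++ " ") := by
              apply List.map_congr_left
              intro j hj
              have hj' := PySem.List.mem_pyRange_one.mp hj
              have hnd : ¬ gap ∣ j := by
                intro hd
                have : gap ∣ (j - pos) := Int.dvd_sub hd hdvd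
                have h2 : 0 < j - pos := by omega
                have h3 : j - pos < gap := by omega
                have := Int.le_of_dvd h2 this
                omega
              unfold pvTok
              rw [if_neg (by
                intro hcc
                exact hnd ((PySem.Int.mod_eq_zero_iff_dvd j gap).mp hcc.1))]
            rw [h1, show (fun j => PySem.Int.toStr (PySem.List.pyGetD pl j 0) ++ " ") =
                  (fun y => PySem.Int.toStr y ++ " ") ∘ (fun j => PySem.List.pyGetD pl j 0) from rfl,
                ← List.map_map,
                map_pyGetD_range_drop_take pl (pos + 1) m2 (by omega) (by omega) hml]
            congr 1
            rw [show (pos + 1).toNat = pos.toNat + 1 by omega, ← hrest']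
            by_cases hcase : pos + gap ≤ l
            · congr 1; omega
            · have hm2l : m2 = l := by omega
              rw [List.take_of_length_le (by omega), List.take_of_length_le (by omega)]
          -- recursive call
          have hrec := ih (rest'.drop (gap - 1).toNat) (pos + gap) (by
              have h1 : (rest'.drop (gap - 1).toNat).length ≤ rest'.length := by simp
              have h2 : rest'.length + 1 ≤ m + 1 := by simpa using hlen
              omega) (by omega) (by
              exact dvd_add hdvd (dvd_refl gap)) (by
              rw [hrest', List.drop_drop]
              congr 1
              omega)
          have hrange2 : (PySem.List.pyRange m2 l 1).map (pvTok pl gap) =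
              (PySem.List.pyRange (pos + gap) l 1).map (pvTok pl gap) := by
            by_cases hcase : pos + gap ≤ l
            · rw [show m2 = pos + gap by omega]
            · rw [show m2 = l by omega, PySem.List.pyRange_one_eq_nil (by omega),
                  PySem.List.pyRange_one_eq_nil (by omega)]
          rw [hrange2, addSkipEmit, hrec, hhead, htail]

-- ===== VERDICT (by name: the statement is the Claim_ definition above) =====
theorem add_skip_ptr_spec : Claim_equal_add_skip_ptr := by
  intro pl _
  unfold Spec_add_skip_ptr add_skip_ptr add_skip_ptr_alt
  set L : Nat := pl.length with hL
  set l : Int := (L : Int) with hl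
  by_cases hbig : l > 2
  · have hLpos : 0 < L := by omega
    have hsq : 0 < ((Nat.sqrt L : Nat) : Int) := by
      have := Nat.sqrt_pos.mpr hLpos
      omega
    set g : Int := PySem.Int.floordiv l ((Nat.sqrt L : Nat) : Int) with hg
    have hgpos : 1 ≤ g := by
      rw [hg, PySem.Int.floordiv_eq_ediv_of_pos hsq]
      have h1 : ((Nat.sqrt L : Nat) : Int) ≤ l := by
        have := Nat.sqrt_le_self L
        omega
      have := (Int.le_ediv_iff_mul_le hsq).mpr (by omega : 1 * ((Nat.sqrt L : Nat) : Int) ≤ l)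
      omega
    rw [if_pos hbig, if_neg (by omega)]
    dsimp only
    rw [← hg]
    -- A's loop body appends exactly pvTok at each index
    rw [show (fun (result : String) (i : Int) =>
          if PySem.Int.mod i g = 0 ∧ i < l - 2 then
            if i + g ≥ l then
              result ++ PySem.Int.toStr (PySem.List.pyGetD pl i 0) ++ " ^" ++
                PySem.Int.toStr (l - i - 1) ++ " "
            else
              result ++ PySem.Int.toStr (PySem.List.pyGetD pl i 0) ++ " ^" ++
                PySem.Int.toStr g ++ " "
          else
            result ++ PySem.Int.toStr (PySem.List.pyGetD pl i 0) ++ " ") =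
        (fun (result : String) (i : Int) => result ++ pvTok pl g i) from by
          funext r i
          unfold pvTok
          rw [← hL, ← hl]
          split_ifs <;> simp [String.append_assoc]]
    rw [foldl_append_eq_join, String.empty_append]
    exact (emit_eq_join pl g hgpos pl.length pl 0 (by omega) (by omega)
      (dvd_zero g) (by simp)).symm
  · rw [if_neg hbig, if_pos (by omega)]
    rw [show (fun (result : String) (i : Int) =>
          result ++ PySem.Int.toStr (PySem.List.pyGetD pl i 0) ++ " ") =
        (fun (result : String) (i : Int) =>
          result ++ (PySem.Int.toStr (PySem.List.pyGetD pl i 0) ++ " ")) from by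
          funext r i; simp [String.append_assoc]]
    rw [foldl_append_eq_join, String.empty_append]
    congr 1
    conv_rhs => rw [show pl = (PySem.List.pyRange 0 l 1).map (fun j => PySem.List.pyGetD pl j 0) from
      (PySem.List.map_pyGetD_pyRange_zero' pl 0).symm]
    rw [List.map_map]
    rfl
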